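-- pv_equiv track=rewrite | github.com/Numerics88/n88tools | n88tools/tables.py | subtables
-- ===== SOURCE A (Python) =====
-- def subtables (table):
--     subtables_list = []
--     # Skip to first subtable
--     i = 0
--     while i < len(table):
--         if table[i][:6] == "------":
--             i += 1
--             break
--         i += 1
--     while i < len(table):
--         subtables_list += [[]]
--         while i < len(table):
--             if table[i][:6] == "------":
--                 i += 1
--                 break
--             subtables_list[-1] += [table[i]]
--             i += 1
--     return subtables_list
-- ===== SOURCE B (Python) =====
-- def subtables(table):
--     seps = [i for i, row in enumerate(table) if row[:6] == "------"]
--     out = []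
--     for j, s in enumerate(seps):
--         if s == len(table) - 1:
--             continue
--         end = seps[j + 1] if j + 1 < len(seps) else len(table)
--         out.append(table[s + 1:end])
--     return out
-- ===== Notes on version B (the rewrite author's own statement) =====
-- stated objective: alternative
-- what changed: Replaces A's nested index-threaded while loops with a two-phase plan: first collect all separator positions with enumerate, then emit each subtable as a single slice between consecutive separators (skipping only a separator that is the last row).
import Mathlib
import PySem

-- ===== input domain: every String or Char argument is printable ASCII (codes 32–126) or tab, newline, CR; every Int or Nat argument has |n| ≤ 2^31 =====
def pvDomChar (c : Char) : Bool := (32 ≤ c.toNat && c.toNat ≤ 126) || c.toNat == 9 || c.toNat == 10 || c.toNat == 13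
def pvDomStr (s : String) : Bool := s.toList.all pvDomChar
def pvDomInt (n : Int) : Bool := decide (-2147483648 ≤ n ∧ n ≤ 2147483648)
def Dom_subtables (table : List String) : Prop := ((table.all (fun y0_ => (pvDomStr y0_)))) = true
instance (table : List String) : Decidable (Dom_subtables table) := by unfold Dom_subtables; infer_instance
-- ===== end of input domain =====

-- B replaces A's nested index-threaded while loops with collect-separator-positions-then-slice; same O(n) cost, different decomposition.

-- ===== PORT A =====
-- row[:6] == "------"  (this literal test appears in both Python sources)
def pvIsSep (s : String) : Bool := PySem.List.slice s.toList none (some 6) == "------".toList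

-- A's while loops are ported with a structural fuel counter (≥ remaining iterations; table.length
-- always suffices because i strictly increases): same computation, made total.
-- first while loop: skip to just past the first separator
def pvSkipA (table : List String) : Nat → Nat → Nat
  | 0, i => i
  | fuel + 1, i =>
    if h : i < table.length then
      if pvIsSep table[i] then i + 1 else pvSkipA table fuel (i + 1)
    else i

-- inner while loop: collect rows of the current subtable, return (rows, new i)
def pvInnerA (table : List String) : Nat → Nat → List String → List String × Nat
  | 0, i, cur => (cur, i)
  | fuel + 1, i, cur =>
    if h : i < table.length then
      if pvIsSep table[i] then (cur, i + 1)
      else pvInnerA table fuel (i + 1) (cur ++ [table[i]])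
    else (cur, i)

-- outer while loop, accumulating the list of subtables
def pvOuterA (table : List String) : Nat → Nat → List (List String) → List (List String)
  | 0, _, acc => acc
  | fuel + 1, i, acc =>
    if _h : i < table.length then
      pvOuterA table fuel (pvInnerA table table.length i []).2
        (acc ++ [(pvInnerA table table.length i []).1])
    else acc

def subtables (table : List String) : List (List String) :=
  pvOuterA table table.length (pvSkipA table table.length 0) []

-- ===== PORT B =====
-- for-loop over the separator-position list: skip a separator that is the last row,
-- otherwise slice up to the next separator (or the end of the table)
def pvBuildB (table : List String) : List Int → List (List String)
  | [] => []
  | s :: rest =>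
      if s = (table.length : Int) - 1 then pvBuildB table rest
      else
        PySem.List.slice table (some (s + 1))
            (some (match rest with | [] => (table.length : Int) | t :: _ => t))
          :: pvBuildB table rest

def subtables_alt (table : List String) : List (List String) :=
  pvBuildB table
    ((PySem.List.enumerate table 0).filterMap (fun p => if pvIsSep p.2 then some p.1 else none))

-- ===== PRECONDITION & SPEC =====
def Spec_subtables (table : List String) (out : List (List String)) : Prop := out = subtables_alt table
instance (table : List String) (out : List (List String)) : Decidable (Spec_subtables table out) := by unfold Spec_subtables; infer_instance

-- ===== CLAIM (what is proved, stated in full; the proofs are below) =====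
def Claim_equal_subtables : Prop := ∀ (table : List String), Dom_subtables table → Spec_subtables table (subtables table)

-- ===== LEMMAS AND PROOFS =====

-- proof-side: the separator positions ≥ i, in order (fuel-based; pvSeps fixes fuel = table.length)
def pvSepsFrom (table : List String) : Nat → Nat → List Nat
  | 0, _ => []
  | fuel + 1, i =>
    if h : i < table.length then
      if pvIsSep table[i] then i :: pvSepsFrom table fuel (i + 1) else pvSepsFrom table fuel (i + 1)
    else []

def pvSeps (table : List String) (i : Nat) : List Nat := pvSepsFrom table table.length i

theorem pvSepsFrom_fuel_ext (table : List String) (f g i : Nat)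
    (hf : table.length ≤ f + i) (hg : table.length ≤ g + i) :
    pvSepsFrom table f i = pvSepsFrom table g i := by
  induction f generalizing g i with
  | zero =>
    cases g with
    | zero => rfl
    | succ g =>
      rw [pvSepsFrom, pvSepsFrom]
      split
      · omega
      · rfl
  | succ f ih =>
    cases g with
    | zero =>
      rw [pvSepsFrom, pvSepsFrom]
      split
      · omega
      · rfl
    | succ g =>
      rw [pvSepsFrom, pvSepsFrom]
      split
      · rw [ih g (i + 1) (by omega) (by omega)]
      · rfl

theorem pvSepsFrom_unfold (table : List String) (f i : Nat) (hf : table.length ≤ f + i) :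
    pvSepsFrom table f i
      = if h : i < table.length then
          (if pvIsSep table[i] then i :: pvSepsFrom table f (i + 1) else pvSepsFrom table f (i + 1))
        else [] := by
  cases f with
  | zero =>
    rw [pvSepsFrom]
    split
    · omega
    · rfl
  | succ g =>
    rw [pvSepsFrom]
    split
    · rw [pvSepsFrom_fuel_ext table g (g + 1) (i + 1) (by omega) (by omega)]
    · rfl

theorem pvSeps_unfold (table : List String) (i : Nat) :
    pvSeps table i
      = if h : i < table.length then
          (if pvIsSep table[i] then i :: pvSeps table (i + 1) else pvSeps table (i + 1))
        else [] :=
  pvSepsFrom_unfold table table.length i (by omega)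

theorem pvSeps_cons (table : List String) (i s : Nat) (rest : List Nat)
    (h : pvSeps table i = s :: rest) :
    i ≤ s ∧ s < table.length ∧ rest = pvSeps table (s + 1) := by
  induction hwf : table.length - i using Nat.strong_induction_on generalizing i with
  | _ fuel ih =>
    subst hwf
    rw [pvSeps_unfold] at h
    split at h
    · rename_i hi
      split at h
      · obtain ⟨h1, h2⟩ := List.cons_eq_cons.mp h
        subst h1; subst h2
        exact ⟨le_refl _, hi, rfl⟩
      · have := ih (table.length - (i + 1)) (by omega) (i + 1) h rfl
        exact ⟨by omega, this.2.1, this.2.2⟩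
    · exact absurd h (by simp)

theorem pvSeps_len (table : List String) (i : Nat) (h : table.length ≤ i) :
    pvSeps table i = [] := by
  rw [pvSeps_unfold]; simp [Nat.not_lt_of_le h]

theorem pvSkipA_eq (table : List String) (fuel i : Nat) (hle : i ≤ table.length)
    (hfuel : table.length ≤ fuel + i) :
    pvSkipA table fuel i = match pvSeps table i with
      | [] => table.length
      | s :: _ => s + 1 := by
  induction fuel generalizing i with
  | zero =>
    have : i = table.length := by omega
    subst this
    rw [pvSkipA, pvSeps_len table table.length (le_refl _)]
  | succ fuel ih =>
    rw [pvSkipA, pvSeps_unfold]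
    split
    · split
      · rfl
      · exact ih (i + 1) (by omega) (by omega)
    · rename_i hi
      simp only []
      omega

theorem pvInnerA_eq (table : List String) (fuel i : Nat) (cur : List String)
    (hle : i ≤ table.length) (hfuel : table.length ≤ fuel + i) :
    pvInnerA table fuel i cur = match pvSeps table i with
      | [] => (cur ++ table.drop i, table.length)
      | s :: _ => (cur ++ (table.drop i).take (s - i), s + 1) := by
  induction fuel generalizing i cur with
  | zero =>
    have hi : i = table.length := by omega
    subst hi
    rw [pvInnerA, pvSeps_len table table.length (le_refl _)]
    simp
  | succ fuel ih =>
    rw [pvInnerA, pvSeps_unfold]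
    split
    · rename_i hi
      split
      · simp
      · rw [ih (i + 1) _ (by omega) (by omega)]
        have hdrop : table.drop i = table[i] :: table.drop (i + 1) :=
          List.drop_eq_getElem_cons hi
        cases hrec : pvSeps table (i + 1) with
        | nil => simp only []; rw [hdrop]; simp
        | cons s rest =>
          have hs := pvSeps_cons table (i + 1) s rest hrec
          have h1 : s - i = (s - (i + 1)) + 1 := by omega
          simp only []
          rw [h1, hdrop, List.take_succ_cons]; simp
    · rename_i hi
      have hi' : i = table.length := by omega
      subst hi'
      simp

theorem pvBuildB_cons (table : List String) (s : Int) (rest : List Int) :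
    pvBuildB table (s :: rest)
      = if s = (table.length : Int) - 1 then pvBuildB table rest
        else PySem.List.slice table (some (s + 1))
              (some (match rest with | [] => (table.length : Int) | t :: _ => t))
            :: pvBuildB table rest := rfl

theorem pvOuterA_eq (table : List String) (fuel s : Nat) (acc : List (List String))
    (hs : s < table.length) (hfuel : table.length ≤ fuel + (s + 1)) :
    pvOuterA table fuel (s + 1) acc
      = acc ++ pvBuildB table ((s : Int) :: (pvSeps table (s + 1)).map (fun (n : Nat) => (n : Int))) := by
  induction fuel generalizing s acc with
  | zero =>
    have hlast : s + 1 = table.length := by omega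
    rw [pvOuterA]
    rw [pvSeps_len table (s + 1) (by omega), List.map_nil]
    have hq : (s : Int) = (table.length : Int) - 1 := by omega
    simp [pvBuildB, hq]
  | succ fuel ih =>
    by_cases h1 : s + 1 < table.length
    · rw [pvOuterA]
      simp only [h1, dif_pos]
      rw [pvInnerA_eq table table.length (s + 1) [] (by omega) (by omega)]
      cases hrec : pvSeps table (s + 1) with
      | nil =>
        simp only [List.nil_append, List.map_nil]
        have houter : pvOuterA table fuel table.length (acc ++ [table.drop (s + 1)]) = acc ++ [table.drop (s + 1)] := by
          cases fuel <;> (rw [pvOuterA]; try simp)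
        rw [houter]
        have hne : ¬ ((s : Int) = (table.length : Int) - 1) := by omega
        simp only [pvBuildB, if_neg hne]
        rw [PySem.List.slice_toNat table (by omega : (0:Int) ≤ (s : Int) + 1) (by omega : (0:Int) ≤ ((table.length : Nat) : Int))]
        have h2 : ((s : Int) + 1).toNat = s + 1 := by omega
        have h3 : (((table.length : Nat) : Int)).toNat = table.length := by omega
        rw [h2, h3]
        have h4 : (table.drop (s + 1)).take (table.length - (s + 1)) = table.drop (s + 1) := by
          apply List.take_of_length_le
          simp
        simp [h4]
      | cons s' rest =>
        have hp := pvSeps_cons table (s + 1) s' rest hrec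
        simp only [List.nil_append, List.map_cons]
        rw [ih s' (acc ++ [(table.drop (s + 1)).take (s' - (s + 1))]) hp.2.1 (by omega)]
        rw [hp.2.2]
        conv_rhs => rw [pvBuildB_cons]
        have hne : ¬ ((s : Int) = (table.length : Int) - 1) := by omega
        rw [if_neg hne]
        have hsl : PySem.List.slice table (some ((s : Int) + 1)) (some ((s' : Int)))
            = (table.drop (s + 1)).take (s' - (s + 1)) := by
          rw [PySem.List.slice_toNat table (by omega : (0:Int) ≤ (s : Int) + 1) (by omega : (0:Int) ≤ ((s' : Nat) : Int))]
          have h2 : ((s : Int) + 1).toNat = s + 1 := by omega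
          have h3 : (((s' : Nat) : Int)).toNat = s' := by omega
          rw [h2, h3]
        simp [hsl]
    · have hlast : s + 1 = table.length := by omega
      rw [pvOuterA]
      simp only [hlast, lt_irrefl, dif_neg, not_false_iff]
      rw [pvSeps_len table table.length (le_refl _), List.map_nil]
      have hq : (s : Int) = (table.length : Int) - 1 := by omega
      simp [pvBuildB, hq]

-- enumerate+filter computes the separator positions
theorem pvEnum_eq_aux (table : List String) (i : Nat) (hle : i ≤ table.length) :
    ((PySem.List.enumerate (table.drop i) (i : Int)).filterMap
        (fun p => if pvIsSep p.2 then some p.1 else none))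
      = (pvSeps table i).map (fun (n : Nat) => (n : Int)) := by
  induction hwf : table.length - i using Nat.strong_induction_on generalizing i with
  | _ fuel ih =>
    subst hwf
    rw [pvSeps_unfold]
    split
    · rename_i hi
      rw [List.drop_eq_getElem_cons hi, PySem.List.enumerate_cons]
      have hcast : (i : Int) + 1 = ((i + 1 : Nat) : Int) := by push_cast; ring
      rw [List.filterMap_cons, hcast, ih (table.length - (i + 1)) (by omega) (i + 1) (by omega) rfl]
      split <;> simp_all
    · rename_i hi
      rw [List.drop_eq_nil_of_le (by omega : table.length ≤ i)]
      simp [PySem.List.enumerate]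

theorem pvEnum_eq (table : List String) :
    ((PySem.List.enumerate table 0).filterMap (fun p => if pvIsSep p.2 then some p.1 else none))
      = (pvSeps table 0).map (fun (n : Nat) => (n : Int)) := by
  have := pvEnum_eq_aux table 0 (Nat.zero_le _)
  simpa using this

-- ===== VERDICT (by name: the statement is the Claim_ definition above) =====
theorem subtables_spec : Claim_equal_subtables := by
  intro table _
  unfold Spec_subtables subtables subtables_alt
  rw [pvEnum_eq, pvSkipA_eq table table.length 0 (Nat.zero_le _) (by omega)]
  cases hrec : pvSeps table 0 with
  | nil =>
    simp only [List.map_nil]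
    cases htl : table.length with
    | zero => rw [pvOuterA]; simp [pvBuildB]
    | succ n => rw [pvOuterA]; simp [htl, pvBuildB]
  | cons s rest =>
    have hp := pvSeps_cons table 0 s rest hrec
    simp only [List.map_cons]
    rw [pvOuterA_eq table table.length s [] hp.2.1 (by omega), hp.2.2]
    simp
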